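-- pv_equiv track=rewrite | github.com/helixzz/hardware-market-trends | bin/generate_hardware_report.py | parse_attempted_sources
-- ===== SOURCE A (Python) =====
-- def parse_attempted_sources(run_notes: list[str]) -> list[str]:
--     sources: set[str] = set()
--     mapping = {
--         'corewave-': 'CoreWaveLabs',
--         'disctech-': 'DiscTech',
--         'provantage-': 'Provantage',
--     }
--     for note in run_notes:
--         for prefix, label in mapping.items():
--             if note.startswith(prefix):
--                 sources.add(label)
--                 break
--     return sorted(sources)
-- ===== SOURCE B (Python) =====
-- def parse_attempted_sources(run_notes: list[str]) -> list[str]: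
--     pairs = [
--         ('corewave-', 'CoreWaveLabs'),
--         ('disctech-', 'DiscTech'),
--         ('provantage-', 'Provantage'),
--     ]
--     # labels are already in sorted order and pairwise distinct, so no set/sort needed
--     return [label for prefix, label in pairs
--             if any(note.startswith(prefix) for note in run_notes)]
-- ===== Notes on version B (the rewrite author's own statement) =====
-- stated objective: simpler
-- what changed: Inverted the nesting: iterate the (prefix,label) mapping once and test each prefix against all notes with any(), emitting labels directly in their already-sorted order, instead of per-note first-match search with break into a set followed by sorted().
import Mathlib
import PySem

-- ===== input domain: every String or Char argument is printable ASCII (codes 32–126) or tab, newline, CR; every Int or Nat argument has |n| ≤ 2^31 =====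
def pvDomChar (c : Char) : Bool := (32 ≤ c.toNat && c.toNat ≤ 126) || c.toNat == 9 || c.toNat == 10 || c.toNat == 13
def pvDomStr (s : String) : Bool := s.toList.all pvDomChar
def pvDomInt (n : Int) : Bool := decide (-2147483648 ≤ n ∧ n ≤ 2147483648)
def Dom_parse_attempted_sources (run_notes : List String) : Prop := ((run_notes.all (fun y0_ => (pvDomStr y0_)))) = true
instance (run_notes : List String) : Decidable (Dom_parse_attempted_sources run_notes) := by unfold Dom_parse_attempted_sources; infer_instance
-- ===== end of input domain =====

-- B inverts the nesting: it iterates the fixed (prefix,label) mapping, testing each prefix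
-- against all notes with any, and emits labels directly in their already-sorted order,
-- replacing A's per-note first-match loop into a set followed by sorting.  (objective: simpler)

-- ===== PORT A =====
-- the dict literal 'mapping', as an insertion-order association list
def pvMapping : List (String × String) :=
  [("corewave-", "CoreWaveLabs"), ("disctech-", "DiscTech"), ("provantage-", "Provantage")]

-- the inner 'for prefix, label in mapping.items(): if note.startswith(prefix): sources.add(label); break'
def pvInnerLoop (s : PySem.Set String) (note : String) : List (String × String) → PySem.Set String
  | [] => s
  | (pre, label) :: rest =>
      if PySem.Str.startswith note pre then PySem.Set.add s label
      else pvInnerLoop s note rest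

def parse_attempted_sources (run_notes : List String) : List String :=
  let sources : PySem.Set String :=
    run_notes.foldl (fun s note => pvInnerLoop s note pvMapping) PySem.Set.empty
  PySem.List.sorted sources (fun x => x) false

-- ===== PORT B =====
def parse_attempted_sources_alt (run_notes : List String) : List String :=
  (([("corewave-", "CoreWaveLabs"), ("disctech-", "DiscTech"),
     ("provantage-", "Provantage")] : List (String × String)).filter
    (fun pl => run_notes.any (fun note => PySem.Str.startswith note pl.1))).map (fun pl => pl.2)

-- ===== PRECONDITION & SPEC =====
def Spec_parse_attempted_sources (run_notes : List String) (out : List String) : Prop := out = parse_attempted_sources_alt run_notes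
instance (run_notes : List String) (out : List String) : Decidable (Spec_parse_attempted_sources run_notes out) := by unfold Spec_parse_attempted_sources; infer_instance

-- ===== CLAIM (what is proved, stated in full; the proofs are below) =====
def Claim_equal_parse_attempted_sources : Prop := ∀ (run_notes : List String), Dom_parse_attempted_sources run_notes → Spec_parse_attempted_sources run_notes (parse_attempted_sources run_notes)

-- ===== LEMMAS AND PROOFS =====

-- a non-empty prefix of a list pins down the list's head
theorem pvPrefixHead {a : Char} {p l : List Char} (h : (a :: p) <+: l) : l.head? = some a := by
  obtain ⟨t, rfl⟩ := h; rfl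

-- the three prefixes are mutually exclusive (their first characters differ),
-- so the 'break' in A's inner loop never hides a later match
theorem pvExclusive (note : String) :
    (PySem.Str.startswith note "corewave-" = true → PySem.Str.startswith note "disctech-" = false ∧ PySem.Str.startswith note "provantage-" = false) ∧
    (PySem.Str.startswith note "disctech-" = true → PySem.Str.startswith note "provantage-" = false) := by
  simp only [PySem.Str.startswith_eq]
  refine ⟨fun h => ⟨?_, ?_⟩, fun h => ?_⟩ <;>
  · rw [← Bool.not_eq_true, PySem.Chars.startswith_iff] at *
    intro h'
    have h1 := pvPrefixHead (by simpa using h)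
    have h2 := pvPrefixHead (by simpa using h')
    simp [h1] at h2

-- membership after one note: exactly the labels of matching prefixes get added
theorem pvMemInner (s : PySem.Set String) (note x : String) :
    x ∈ pvInnerLoop s note pvMapping ↔
      x ∈ s ∨ (PySem.Str.startswith note "corewave-" = true ∧ x = "CoreWaveLabs")
            ∨ (PySem.Str.startswith note "disctech-" = true ∧ x = "DiscTech")
            ∨ (PySem.Str.startswith note "provantage-" = true ∧ x = "Provantage") := by
  obtain ⟨hc, hd⟩ := pvExclusive note
  simp only [pvMapping, pvInnerLoop]
  split_ifs with h1 h2 h3 <;>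
    simp_all [PySem.Set.mem_add]

-- the inner loop keeps the set duplicate-free
theorem pvNodupInner (s : PySem.Set String) (note : String) (hs : s.Nodup) :
    (pvInnerLoop s note pvMapping).Nodup := by
  simp only [pvMapping, pvInnerLoop]
  split_ifs <;> first | exact PySem.Set.nodup_add _ _ hs | exact hs

theorem pvNodupFold (l : List String) (s : PySem.Set String) (hs : s.Nodup) :
    (l.foldl (fun s note => pvInnerLoop s note pvMapping) s).Nodup := by
  induction l generalizing s with
  | nil => exact hs
  | cons n t ih => exact ih _ (pvNodupInner s n hs)

-- a propositional regrouping used in pvMemFold's induction step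
theorem pvShuffle {S A1 A2 A3 T1 T2 T3 X1 X2 X3 : Prop} :
    ((S ∨ (A1 ∧ X1) ∨ (A2 ∧ X2) ∨ (A3 ∧ X3)) ∨ (T1 ∧ X1) ∨ (T2 ∧ X2) ∨ (T3 ∧ X3)) ↔
    (S ∨ ((A1 ∨ T1) ∧ X1) ∨ ((A2 ∨ T2) ∧ X2) ∨ ((A3 ∨ T3) ∧ X3)) := by
  tauto

-- membership in the folded set, characterised by the three 'any' tests
theorem pvMemFold (l : List String) (s : PySem.Set String) (x : String) :
    x ∈ l.foldl (fun s note => pvInnerLoop s note pvMapping) s ↔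
      x ∈ s ∨ (l.any (fun n => PySem.Str.startswith n "corewave-") = true ∧ x = "CoreWaveLabs")
            ∨ (l.any (fun n => PySem.Str.startswith n "disctech-") = true ∧ x = "DiscTech")
            ∨ (l.any (fun n => PySem.Str.startswith n "provantage-") = true ∧ x = "Provantage") := by
  induction l generalizing s with
  | nil => simp
  | cons n t ih =>
      rw [List.foldl_cons, ih, pvMemInner]
      simp only [List.any_cons, Bool.or_eq_true]
      exact pvShuffle

-- B's output, characterised: membership …
theorem pvMemAlt (run_notes : List String) (x : String) :
    x ∈ parse_attempted_sources_alt run_notes ↔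
      (run_notes.any (fun n => PySem.Str.startswith n "corewave-") = true ∧ x = "CoreWaveLabs")
      ∨ (run_notes.any (fun n => PySem.Str.startswith n "disctech-") = true ∧ x = "DiscTech")
      ∨ (run_notes.any (fun n => PySem.Str.startswith n "provantage-") = true ∧ x = "Provantage") := by
  cases h1 : run_notes.any (fun n => PySem.Str.startswith n "corewave-") <;>
  cases h2 : run_notes.any (fun n => PySem.Str.startswith n "disctech-") <;>
  cases h3 : run_notes.any (fun n => PySem.Str.startswith n "provantage-") <;>
  simp only [parse_attempted_sources_alt, List.filter_cons, List.filter_nil, h1, h2, h3] <;> simp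

-- … and strict sortedness (labels appear in their fixed, strictly increasing order)
theorem pvAltPairwise (run_notes : List String) :
    (parse_attempted_sources_alt run_notes).Pairwise (fun a b : String => a < b) := by
  cases h1 : run_notes.any (fun n => PySem.Str.startswith n "corewave-") <;>
  cases h2 : run_notes.any (fun n => PySem.Str.startswith n "disctech-") <;>
  cases h3 : run_notes.any (fun n => PySem.Str.startswith n "provantage-") <;>
  simp only [parse_attempted_sources_alt, List.filter_cons, List.filter_nil, h1, h2, h3] <;>
  simp [String.lt_iff_toList_lt] <;> decide

theorem pvAltNodup (run_notes : List String) :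
    (parse_attempted_sources_alt run_notes).Nodup :=
  (pvAltPairwise run_notes).imp (fun h => ne_of_lt h)

-- ===== VERDICT (by name: the statement is the Claim_ definition above) =====
theorem parse_attempted_sources_spec : Claim_equal_parse_attempted_sources := by
  intro run_notes _
  unfold Spec_parse_attempted_sources parse_attempted_sources
  have hperm : (parse_attempted_sources_alt run_notes).Perm
      (run_notes.foldl (fun s note => pvInnerLoop s note pvMapping) PySem.Set.empty) := by
    refine (List.perm_ext_iff_of_nodup (pvAltNodup run_notes)
      (pvNodupFold run_notes PySem.Set.empty (by simp [PySem.Set.empty]))).2 ?_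
    intro x
    rw [pvMemAlt, pvMemFold]
    simp [PySem.Set.empty]
  exact PySem.List.sorted_eq_of_perm_of_pairwise_lt _ _ _ hperm (pvAltPairwise run_notes)
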